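-- pv_equiv track=rewrite | github.com/BruinGrowly/Semantic-Compressor | src/ljpw/semantic_finder.py | _check_hierarchy
-- ===== SOURCE A (Python) =====
-- def _check_hierarchy(text: str) -> bool:
--     """Is there nested structure?"""
--     # Check for nested brackets, indentation, or containment
--     nesting_chars = ['()', '[]', '{}', '<>']
--
--     for open_c, close_c in [tuple(pair) for pair in nesting_chars]:
--         if open_c in text and close_c in text:
--             depth = 0
--             max_depth = 0
--             for c in text:
--                 if c == open_c:
--                     depth += 1
--                     max_depth = max(max_depth, depth)
--                 elif c == close_c:
--                     depth -= 1
--             if max_depth >= 2: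
--                 return True
--
--     return False
-- ===== SOURCE B (Python) =====
-- def _check_hierarchy(text: str) -> bool:
--     """Is there nested structure?"""
--     # Single pass: per bracket pair track depth, max depth, and seen flags.
--     opens = {'(': 0, '[': 1, '{': 2, '<': 3}
--     closes = {')': 0, ']': 1, '}': 2, '>': 3}
--     depth = [0, 0, 0, 0]
--     max_depth = [0, 0, 0, 0]
--     seen_open = [False, False, False, False]
--     seen_close = [False, False, False, False]
--     for ch in text:
--         i = opens.get(ch)
--         if i is not None:
--             depth[i] += 1
--             if depth[i] > max_depth[i]:
--                 max_depth[i] = depth[i]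
--             seen_open[i] = True
--         else:
--             i = closes.get(ch)
--             if i is not None:
--                 depth[i] -= 1
--                 seen_close[i] = True
--     return any(seen_open[i] and seen_close[i] and max_depth[i] >= 2
--                for i in range(4))
-- ===== Notes on version B (the rewrite author's own statement) =====
-- stated objective: alternative
-- what changed: Replaces A's per-pair passes (two substring membership scans plus a full depth scan for each of the four bracket pairs, with early return) by ONE pass over the text maintaining depth, max depth and open/close-seen flags for all four pairs at once, followed by a constant-size check.
import Mathlib
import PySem

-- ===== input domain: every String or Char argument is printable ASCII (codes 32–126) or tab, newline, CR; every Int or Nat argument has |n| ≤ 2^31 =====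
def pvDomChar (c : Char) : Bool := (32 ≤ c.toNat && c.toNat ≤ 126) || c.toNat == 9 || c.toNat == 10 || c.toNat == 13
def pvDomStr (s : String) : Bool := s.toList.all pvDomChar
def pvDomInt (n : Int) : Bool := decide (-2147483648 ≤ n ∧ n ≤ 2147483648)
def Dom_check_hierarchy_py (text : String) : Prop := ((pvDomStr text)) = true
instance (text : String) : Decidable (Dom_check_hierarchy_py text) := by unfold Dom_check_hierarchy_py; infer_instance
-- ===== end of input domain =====

-- B replaces A's per-pair scans (membership tests + a depth scan for each of four
-- bracket pairs) by one pass maintaining all four pairs' depth/max-depth/seen state.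


-- ===== PORT A =====
-- A's inner loop over the text for one pair: (depth, max_depth)
def scanA (o c : Char) (s : Int × Int) (ch : Char) : Int × Int :=
  if ch = o then (s.1 + 1, max s.2 (s.1 + 1))
  else if ch = c then (s.1 - 1, s.2) else s

-- one iteration of A's outer loop; `open_c in text` for a single char is
-- exactly char membership in the character list
def pairCheckA (o c : Char) (l : List Char) : Bool :=
  if l.contains o && l.contains c then
    decide ((l.foldl (scanA o c) (0, 0)).2 ≥ 2)
  else false

-- early-return chain over the four pairs
def check_hierarchy_py (text : String) : Bool :=
  let l := text.toList
  pairCheckA '(' ')' l || pairCheckA '[' ']' l || pairCheckA '{' '}' l || pairCheckA '<' '>' l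

-- ===== PORT B =====
-- per-pair state: (depth, max_depth, seen_open, seen_close)
def stepP (o c : Char) (s : Int × Int × Bool × Bool) (ch : Char) : Int × Int × Bool × Bool :=
  if ch = o then (s.1 + 1, max s.2.1 (s.1 + 1), true, s.2.2.2)
  else if ch = c then (s.1 - 1, s.2.1, s.2.2.1, true)
  else s

-- one character of B's single pass: the character updates the (at most one) pair
-- it belongs to; stepP is the identity for the other pairs
def stepB (s : (Int × Int × Bool × Bool) × (Int × Int × Bool × Bool) × (Int × Int × Bool × Bool) × (Int × Int × Bool × Bool))
    (ch : Char) :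
    (Int × Int × Bool × Bool) × (Int × Int × Bool × Bool) × (Int × Int × Bool × Bool) × (Int × Int × Bool × Bool) :=
  (stepP '(' ')' s.1 ch, stepP '[' ']' s.2.1 ch, stepP '{' '}' s.2.2.1 ch, stepP '<' '>' s.2.2.2 ch)

def verdictB (s : Int × Int × Bool × Bool) : Bool :=
  s.2.2.1 && s.2.2.2 && decide (s.2.1 ≥ 2)

def check_hierarchy_py_alt (text : String) : Bool :=
  let z : Int × Int × Bool × Bool := (0, 0, false, false)
  let f := text.toList.foldl stepB (z, z, z, z)
  verdictB f.1 || verdictB f.2.1 || verdictB f.2.2.1 || verdictB f.2.2.2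

-- ===== PRECONDITION & SPEC =====
def Spec_check_hierarchy_py (text : String) (out : Bool) : Prop := out = check_hierarchy_py_alt text
instance (text : String) (out : Bool) : Decidable (Spec_check_hierarchy_py text out) := by unfold Spec_check_hierarchy_py; infer_instance

-- ===== CLAIM (what is proved, stated in full; the proofs are below) =====
def Claim_equal_check_hierarchy_py : Prop := ∀ (text : String), Dom_check_hierarchy_py text → Spec_check_hierarchy_py text (check_hierarchy_py text)

-- ===== LEMMAS AND PROOFS =====

-- B's combined fold is the product of the four per-pair folds
theorem foldB_proj (l : List Char) (a b c d : Int × Int × Bool × Bool) :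
    l.foldl stepB (a, b, c, d) =
      (l.foldl (stepP '(' ')') a, l.foldl (stepP '[' ']') b,
       l.foldl (stepP '{' '}') c, l.foldl (stepP '<' '>') d) := by
  induction l generalizing a b c d with
  | nil => rfl
  | cons ch t ih => simp [List.foldl, stepB, ih]

-- the seen_open flag of the per-pair fold
theorem so_spec (o c : Char) (l : List Char) (s : Int × Int × Bool × Bool) :
    (l.foldl (stepP o c) s).2.2.1 = (s.2.2.1 || l.contains o) := by
  induction l generalizing s with
  | nil => simp
  | cons ch t ih =>
    simp only [List.foldl, List.contains_cons, ih]
    by_cases h1 : ch = o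
    · subst h1; simp [stepP]
    · have hne : (o == ch) = false := by
        simp only [beq_eq_false_iff_ne, ne_eq]; exact fun h => h1 h.symm
      by_cases h2 : ch = c
      · subst h2; simp [stepP, h1, hne]
      · simp [stepP, h1, h2, hne]

-- the seen_close flag of the per-pair fold (open ≠ close)
theorem sc_spec (o c : Char) (hoc : o ≠ c) (l : List Char) (s : Int × Int × Bool × Bool) :
    (l.foldl (stepP o c) s).2.2.2 = (s.2.2.2 || l.contains c) := by
  induction l generalizing s with
  | nil => simp
  | cons ch t ih =>
    simp only [List.foldl, List.contains_cons, ih]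
    by_cases h1 : ch = o
    · subst h1
      have hne : (c == ch) = false := by
        simp only [beq_eq_false_iff_ne, ne_eq]; exact fun h => hoc h.symm
      simp [stepP, hne]
    · by_cases h2 : ch = c
      · subst h2; simp [stepP, h1]
      · have hne : (c == ch) = false := by
          simp only [beq_eq_false_iff_ne, ne_eq]; exact fun h => h2 h.symm
        simp [stepP, h1, h2, hne]

-- the (depth, max_depth) components of the per-pair fold are A's inner scan
theorem dm_spec (o c : Char) (l : List Char) (s : Int × Int × Bool × Bool) :
    ((l.foldl (stepP o c) s).1, (l.foldl (stepP o c) s).2.1) =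
      l.foldl (scanA o c) (s.1, s.2.1) := by
  induction l generalizing s with
  | nil => rfl
  | cons ch t ih =>
    simp only [List.foldl, ih]
    by_cases h1 : ch = o
    · subst h1; simp [stepP, scanA]
    · by_cases h2 : ch = c
      · subst h2; simp [stepP, scanA, h1]
      · simp [stepP, scanA, h1, h2]

-- per pair: A's pair check equals B's verdict on the per-pair fold
theorem pair_eq (o c : Char) (hoc : o ≠ c) (l : List Char) :
    pairCheckA o c l = verdictB (l.foldl (stepP o c) ((0 : Int), (0 : Int), false, false)) := by
  have hso := so_spec o c l ((0 : Int), (0 : Int), false, false)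
  have hsc := sc_spec o c hoc l ((0 : Int), (0 : Int), false, false)
  have hdm := dm_spec o c l ((0 : Int), (0 : Int), false, false)
  have hmax : (l.foldl (stepP o c) ((0 : Int), (0 : Int), false, false)).2.1
      = (l.foldl (scanA o c) ((0 : Int), (0 : Int))).2 := congrArg Prod.snd hdm
  unfold pairCheckA verdictB
  rw [hso, hsc, hmax]
  by_cases h1 : l.contains o <;> by_cases h2 : l.contains c <;> simp

-- ===== VERDICT (by name: the statement is the Claim_ definition above) =====
theorem check_hierarchy_py_spec : Claim_equal_check_hierarchy_py := by
  intro text _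
  unfold Spec_check_hierarchy_py
  simp only [check_hierarchy_py, check_hierarchy_py_alt]
  rw [foldB_proj]
  rw [pair_eq '(' ')' (by decide), pair_eq '[' ']' (by decide),
      pair_eq '{' '}' (by decide), pair_eq '<' '>' (by decide)]
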